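-- pv_equiv track=rewrite | github.com/ernestvmo/AdventOfCode | 2015/day_08/AoC.py | string_encoded
-- ===== SOURCE A (Python) =====
-- def string_encoded(santa_list: list[str]):
--     string = 0
--     encoded = 0
--
--     for item in santa_list:
--         string += len(item)
--         if "\\" in item:
--             item = item.replace("\\", "\\\\")
--         if "\"" in item:
--             item = item.replace("\"", "\\\"")
--         encoded += len(item) + 2
--     return encoded - string
-- ===== SOURCE B (Python) =====
-- def string_encoded(santa_list: list[str]):
--     return sum(2 + item.count("\\") + item.count("\"") for item in santa_list)
-- ===== Notes on version B (the rewrite author's own statement) =====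
-- stated objective: simpler
-- what changed: Replaced the two running totals (raw length and encoded length via replace-expanded strings) and their final subtraction with a single direct sum of per-string overhead 2 + count('\') + count('"'); no strings are rebuilt.
import Mathlib
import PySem

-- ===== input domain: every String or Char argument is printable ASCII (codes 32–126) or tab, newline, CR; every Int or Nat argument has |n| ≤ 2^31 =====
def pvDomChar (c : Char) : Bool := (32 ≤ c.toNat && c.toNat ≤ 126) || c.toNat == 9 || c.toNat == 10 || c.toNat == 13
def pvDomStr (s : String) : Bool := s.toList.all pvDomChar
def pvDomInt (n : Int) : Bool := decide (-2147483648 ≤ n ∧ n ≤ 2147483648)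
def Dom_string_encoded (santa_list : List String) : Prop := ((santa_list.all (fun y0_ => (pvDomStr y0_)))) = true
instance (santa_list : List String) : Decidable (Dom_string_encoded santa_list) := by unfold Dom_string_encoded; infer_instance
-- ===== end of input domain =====

-- B drops A's two accumulators and replace calls: it sums the per-string overhead 2 + count('\') + count('"') directly (simpler; not faster).

-- ===== PORT A =====
def string_encoded (santa_list : List String) : Int :=
  (santa_list.foldl (fun (st : Int × Int) item =>
    let string := st.1 + PySem.Str.len item
    let item1 := if PySem.Str.isIn "\\" item then PySem.Str.replace item "\\" "\\\\" else item
    let item2 := if PySem.Str.isIn "\"" item1 then PySem.Str.replace item1 "\"" "\\\"" else item1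
    (string, st.2 + PySem.Str.len item2 + 2)) (0, 0)).2
  - (santa_list.foldl (fun (st : Int × Int) item =>
    let string := st.1 + PySem.Str.len item
    let item1 := if PySem.Str.isIn "\\" item then PySem.Str.replace item "\\" "\\\\" else item
    let item2 := if PySem.Str.isIn "\"" item1 then PySem.Str.replace item1 "\"" "\\\"" else item1
    (string, st.2 + PySem.Str.len item2 + 2)) (0, 0)).1

-- ===== PORT B =====
def string_encoded_alt (santa_list : List String) : Int :=
  (santa_list.map (fun item =>
    2 + (PySem.Str.count item "\\" : Int) + (PySem.Str.count item "\"" : Int))).sum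

-- ===== PRECONDITION & SPEC =====
def Spec_string_encoded (santa_list : List String) (out : Int) : Prop := out = string_encoded_alt santa_list
instance (santa_list : List String) (out : Int) : Decidable (Spec_string_encoded santa_list out) := by unfold Spec_string_encoded; infer_instance

-- ===== CLAIM (what is proved, stated in full; the proofs are below) =====
def Claim_equal_string_encoded : Prop := ∀ (santa_list : List String), Dom_string_encoded santa_list → Spec_string_encoded santa_list (string_encoded santa_list)

-- ===== LEMMAS AND PROOFS =====

theorem count_go_singleton (c : Char) (cs : List Char) (fuel : Nat) (acc : Nat)
    (h : cs.length ≤ fuel) :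
    PySem.Chars.count.go [c] fuel cs acc = acc + cs.count c := by
  induction cs generalizing fuel acc with
  | nil => cases fuel <;> simp [PySem.Chars.count.go]
  | cons x t ih =>
    cases fuel with
    | zero => simp at h
    | succ f =>
      simp only [PySem.Chars.count.go]
      by_cases hx : x = c
      · subst hx
        simp only [List.isPrefixOf, BEq.rfl, Bool.true_and, if_true, List.length_cons,
          List.length_nil, List.drop_succ_cons, List.drop_zero]
        rw [ih f (acc + 1) (by simpa using h)]
        simp [List.count_cons]
        omega
      · have : ([c].isPrefixOf (x :: t)) = false := by
          simp [List.isPrefixOf, beq_iff_eq]; exact fun hc => hx hc.symm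
        rw [this]
        simp only [if_false, Bool.false_eq_true]
        rw [ih f acc (by simpa using h)]
        simp [List.count_cons, hx]


theorem chars_count_singleton (cs : List Char) (c : Char) :
    PySem.Chars.count cs [c] = cs.count c := by
  simp [PySem.Chars.count, count_go_singleton c cs cs.length 0 le_rfl]

theorem replace_go_singleton (c : Char) (new : List Char) (cs : List Char) (fuel : Nat)
    (acc : List Char) (h : cs.length ≤ fuel) :
    PySem.Chars.replace.go [c] new fuel cs acc =
      acc.reverse ++ cs.flatMap (fun x => if x = c then new else [x]) := by
  induction cs generalizing fuel acc with
  | nil => cases fuel <;> simp [PySem.Chars.replace.go]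
  | cons x t ih =>
    cases fuel with
    | zero => simp at h
    | succ f =>
      simp only [PySem.Chars.replace.go]
      by_cases hx : x = c
      · subst hx
        simp only [List.isPrefixOf, BEq.rfl, Bool.true_and, if_true, List.length_cons,
          List.length_nil, List.drop_succ_cons, List.drop_zero]
        rw [ih f (new.reverse ++ acc) (by simpa using h)]
        simp
      · have : ([c].isPrefixOf (x :: t)) = false := by
          simp [List.isPrefixOf, beq_iff_eq]; exact fun hc => hx hc.symm
        rw [this]
        simp only [if_false, Bool.false_eq_true]
        rw [ih f (x :: acc) (by simpa using h)]
        simp [hx]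

theorem chars_replace_singleton (cs : List Char) (c : Char) (new : List Char) :
    PySem.Chars.replace cs [c] new = cs.flatMap (fun x => if x = c then new else [x]) := by
  simp [PySem.Chars.replace, replace_go_singleton c new cs cs.length [] le_rfl]

theorem flatMap_of_not_mem (cs : List Char) (c : Char) (new : List Char) (h : c ∉ cs) :
    cs.flatMap (fun x => if x = c then new else [x]) = cs := by
  induction cs with
  | nil => simp
  | cons x t ih =>
    simp only [List.mem_cons, not_or] at h
    have hxc : ¬ x = c := fun hh => h.1 hh.symm
    simp [List.flatMap_cons, ih h.2, hxc]

-- after a guarded replace, the string is the flatMap expansion in BOTH branches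
theorem guarded_replace_toList (s : String) (pat : String) (c : Char) (new : String)
    (hpat : pat.toList = [c]) :
    (if PySem.Str.isIn pat s then PySem.Str.replace s pat new else s).toList
      = s.toList.flatMap (fun x => if x = c then new.toList else [x]) := by
  by_cases hin : PySem.Str.isIn pat s
  · simp only [hin, if_true]
    rw [PySem.Str.toList_replace, hpat, chars_replace_singleton]
  · simp only [hin, if_false, Bool.false_eq_true]
    have hmem : c ∉ s.toList := by
      intro hm
      apply hin
      rw [PySem.Str.isIn_iff_infix, hpat]
      obtain ⟨l1, l2, hsplit⟩ := List.append_of_mem hm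
      exact ⟨l1, l2, by simp [hsplit]⟩
    exact (flatMap_of_not_mem _ _ _ hmem).symm

theorem length_flatMap_two (cs : List Char) (c : Char) (new : List Char)
    (hlen : new.length = 2) :
    (cs.flatMap (fun x => if x = c then new else [x])).length = cs.length + cs.count c := by
  induction cs with
  | nil => simp
  | cons x t ih =>
    by_cases hx : x = c
    · subst hx; simp [List.flatMap_cons, hlen, List.count_cons, ih]; omega
    · simp [List.flatMap_cons, hx, List.count_cons, ih]; omega

theorem count_flatMap_ne (cs : List Char) (c q : Char) (new : List Char)
    (hne : q ≠ c) (hnew : q ∉ new) :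
    (cs.flatMap (fun x => if x = c then new else [x])).count q = cs.count q := by
  induction cs with
  | nil => simp
  | cons x t ih =>
    by_cases hx : x = c
    · subst hx
      have hxq : ¬ x = q := fun hh => hne hh.symm
      simp [List.flatMap_cons, List.count_append, ih, List.count_cons,
        List.count_eq_zero.mpr hnew, hxq]
    · simp [List.flatMap_cons, List.count_append, ih, List.count_cons, hx]

-- per-item overhead: A's encoded-length growth minus raw length = B's per-item term
theorem per_item (s : String) :
    (PySem.Str.len
        (if PySem.Str.isIn "\"" (if PySem.Str.isIn "\\" s then PySem.Str.replace s "\\" "\\\\" else s)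
          then PySem.Str.replace
            (if PySem.Str.isIn "\\" s then PySem.Str.replace s "\\" "\\\\" else s) "\"" "\\\""
          else (if PySem.Str.isIn "\\" s then PySem.Str.replace s "\\" "\\\\" else s)) + 2)
      - PySem.Str.len s
      = 2 + (PySem.Str.count s "\\" : Int) + (PySem.Str.count s "\"" : Int) := by
  have h1 : (if PySem.Str.isIn "\\" s then PySem.Str.replace s "\\" "\\\\" else s).toList
      = s.toList.flatMap (fun x => if x = '\\' then ['\\', '\\'] else [x]) := by
    exact guarded_replace_toList s "\\" '\\' "\\\\" (by decide)
  set i1 := (if PySem.Str.isIn "\\" s then PySem.Str.replace s "\\" "\\\\" else s) with hi1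
  have h2 : (if PySem.Str.isIn "\"" i1 then PySem.Str.replace i1 "\"" "\\\"" else i1).toList
      = i1.toList.flatMap (fun x => if x = '\"' then ['\\', '\"'] else [x]) := by
    exact guarded_replace_toList i1 "\"" '\"' "\\\"" (by decide)
  have hlen1 : i1.toList.length = s.toList.length + s.toList.count '\\' := by
    rw [h1]; exact length_flatMap_two _ _ _ rfl
  have hcq : i1.toList.count '\"' = s.toList.count '\"' := by
    rw [h1]
    exact count_flatMap_ne _ _ _ _ (by decide) (by decide)
  have hlen2 : (if PySem.Str.isIn "\"" i1 then PySem.Str.replace i1 "\"" "\\\"" else i1).toList.length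
      = i1.toList.length + i1.toList.count '\"' := by
    rw [h2]; exact length_flatMap_two _ _ _ rfl
  have hca : PySem.Str.count s "\\" = s.toList.count '\\' := by
    have : ("\\" : String).toList = ['\\'] := rfl
    rw [PySem.Str.count, this, chars_count_singleton]
  have hcb : PySem.Str.count s "\"" = s.toList.count '\"' := by
    have : ("\"" : String).toList = ['\"'] := rfl
    rw [PySem.Str.count, this, chars_count_singleton]
  simp only [PySem.Str.len, hlen2, hlen1, hcq, hca, hcb]
  push_cast
  ring

theorem fold_invariant (l : List String) (s0 e0 : Int) :
    (l.foldl (fun (st : Int × Int) item =>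
      let string := st.1 + PySem.Str.len item
      let item1 := if PySem.Str.isIn "\\" item then PySem.Str.replace item "\\" "\\\\" else item
      let item2 := if PySem.Str.isIn "\"" item1 then PySem.Str.replace item1 "\"" "\\\"" else item1
      (string, st.2 + PySem.Str.len item2 + 2)) (s0, e0)).2
    - (l.foldl (fun (st : Int × Int) item =>
      let string := st.1 + PySem.Str.len item
      let item1 := if PySem.Str.isIn "\\" item then PySem.Str.replace item "\\" "\\\\" else item
      let item2 := if PySem.Str.isIn "\"" item1 then PySem.Str.replace item1 "\"" "\\\"" else item1
      (string, st.2 + PySem.Str.len item2 + 2)) (s0, e0)).1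
    = (e0 - s0) + (l.map (fun item =>
        2 + (PySem.Str.count item "\\" : Int) + (PySem.Str.count item "\"" : Int))).sum := by
  induction l generalizing s0 e0 with
  | nil => simp
  | cons x t ih =>
    simp only [List.foldl_cons, List.map_cons, List.sum_cons]
    rw [ih]
    have := per_item x
    omega

-- ===== VERDICT (by name: the statement is the Claim_ definition above) =====
theorem string_encoded_spec : Claim_equal_string_encoded := by
  intro santa_list _
  unfold Spec_string_encoded string_encoded string_encoded_alt
  have h := fold_invariant santa_list 0 0
  omega
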